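-- pv_equiv track=rewrite | github.com/Lewis0770/reorganization | code/Crystal_d3/d3_interactive.py | get_atoms_and_shells
-- ===== SOURCE A (Python) =====
-- from typing import Dict, List, Optional, Tuple, Any, Union
--
-- def get_atoms_and_shells(data_list: List[List]) -> Tuple[List[str], List[Dict]]:
--     """Extract atoms and shell information from alldos.py style data_list."""
--
--     # Find all atoms in the data (lines with 5 elements)
--     atoms = []
--     atom_list = []  # Unique atom types
--     atoms_index = []
--
--     for i, line in enumerate(data_list):
--         if len(line) == 5:
--             atoms.append(line[1])  # Element symbol
--             if line[1] not in atom_list: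
--                 atom_and_index = [line[1], i]
--                 atom_list.append(line[1])
--                 atoms_index.append(atom_and_index)
--
--     # Count shells for each atom type (similar to alldos.py's number_shells)
--     atoms_shells = {}
--     for atom in atoms_index:
--         S, P, SP, D, F = 0, 0, 0, 0, 0
--         for i in range(int(atom[1]) + 1, len(data_list)):
--             if len(data_list[i]) >= 5:
--                 break
--             elif len(data_list[i]) > 0 and "S" in data_list[i][-1]:
--                 S += 1
--             elif len(data_list[i]) > 0 and "SP" in data_list[i][-1]:
--                 if len(data_list[i]) == 2:
--                     SP_shells = data_list[i][0].split("-")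
--                     for j in range(int(SP_shells[0]), int(SP_shells[1]) + 1):
--                         SP += 1
--                 elif len(data_list[i]) == 3:
--                     for j in range(
--                         int(data_list[i][0].split("-")[0]), int(data_list[i][1]) + 1
--                     ):
--                         SP += 1
--             elif len(data_list[i]) > 0 and "P" in data_list[i][-1]:
--                 if len(data_list[i]) == 2:
--                     P_shells = data_list[i][0].split("-")
--                     for j in range(int(P_shells[0]), int(P_shells[1]) + 1):
--                         P += 1
--                 elif len(data_list[i]) == 3:
--                     for j in range(
--                         int(data_list[i][0].split("-")[0]), int(data_list[i][1]) + 1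
--                     ):
--                         P += 1
--             elif len(data_list[i]) > 0 and "D" in data_list[i][-1]:
--                 if len(data_list[i]) == 2:
--                     D_shells = data_list[i][0].split("-")
--                     for j in range(int(D_shells[0]), int(D_shells[1]) + 1):
--                         D += 1
--                 elif len(data_list[i]) == 3:
--                     for j in range(
--                         int(data_list[i][0].split("-")[0]), int(data_list[i][1]) + 1
--                     ):
--                         D += 1
--             elif len(data_list[i]) > 0 and "F" in data_list[i][-1]:
--                 if len(data_list[i]) == 2:
--                     F_shells = data_list[i][0].split("-")
--                     for j in range(int(F_shells[0]), int(F_shells[1]) + 1):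
--                         F += 1
--                 elif len(data_list[i]) == 3:
--                     for j in range(
--                         int(data_list[i][0].split("-")[0]), int(data_list[i][1]) + 1
--                     ):
--                         F += 1
--         atoms_shells[atom[0]] = {"S": S, "SP": SP, "P": P, "D": D, "F": F}
--         S, P, SP, D, F = 0, 0, 0, 0, 0
--
--     return atoms, atoms_shells
-- ===== SOURCE B (Python) =====
-- # Single streaming pass: one loop over data_list with an `active` atom name, replacing
-- # A's two-pass index scan; shell-range sizes computed arithmetically instead of by looping.
-- from typing import Dict, List, Tuple
--
--
-- def _span(line: List) -> int:
--     """Number of shells a P/D/F line contributes (size of A's range loop)."""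
--     if len(line) == 2:
--         parts = line[0].split("-")
--         return max(0, int(parts[1]) + 1 - int(parts[0]))
--     if len(line) == 3:
--         return max(0, int(line[1]) + 1 - int(line[0].split("-")[0]))
--     return 0
--
--
-- def get_atoms_and_shells(data_list: List[List]) -> Tuple[List[str], Dict[str, Dict]]:
--     atoms = []
--     table = {}  # atom symbol -> [S, SP, P, D, F], first-occurrence order
--     active = None  # symbol whose first block we are currently inside, else None
--     for line in data_list:
--         if len(line) == 5:
--             atoms.append(line[1])
--             if line[1] not in table:
--                 table[line[1]] = [0, 0, 0, 0, 0]
--                 active = line[1]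
--             else:
--                 active = None
--         elif len(line) > 5:
--             active = None
--         elif active is not None and len(line) > 0:
--             counts = table[active]
--             last = line[-1]
--             if "S" in last:
--                 counts[0] += 1
--             elif "P" in last:
--                 counts[2] += _span(line)
--             elif "D" in last:
--                 counts[3] += _span(line)
--             elif "F" in last:
--                 counts[4] += _span(line)
--     return atoms, {
--         k: {"S": v[0], "SP": v[1], "P": v[2], "D": v[3], "F": v[4]}
--         for k, v in table.items()
--     }
-- ===== Notes on version B (the rewrite author's own statement) =====
-- stated objective: simpler
-- what changed: Replaced A's two passes (collect first-occurrence indices, then re-scan the list from each index with an inner break loop) by one streaming pass carrying the currently active atom, and replaced the shell-range counting loops by the arithmetic max(0, b+1-a).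
import Mathlib
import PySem

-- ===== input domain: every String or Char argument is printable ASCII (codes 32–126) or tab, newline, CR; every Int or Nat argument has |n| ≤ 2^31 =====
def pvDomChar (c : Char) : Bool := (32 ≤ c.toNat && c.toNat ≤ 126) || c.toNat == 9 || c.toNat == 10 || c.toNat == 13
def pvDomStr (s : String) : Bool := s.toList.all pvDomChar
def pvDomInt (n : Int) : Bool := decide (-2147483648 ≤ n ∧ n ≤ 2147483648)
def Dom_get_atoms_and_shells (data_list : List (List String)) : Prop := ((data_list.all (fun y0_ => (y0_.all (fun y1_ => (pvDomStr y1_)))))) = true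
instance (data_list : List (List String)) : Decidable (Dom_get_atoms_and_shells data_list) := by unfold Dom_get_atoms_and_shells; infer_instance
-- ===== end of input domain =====

-- B is a single streaming pass (one loop, an `active` atom marker) replacing A's
-- two-pass index re-scan, with shell-range sizes computed arithmetically instead of
-- by counting loops; objective: simpler.  A = B is proved on all inputs admitted by Pre_.

-- ===== PORT A =====
-- 'for j in range(int(a), int(b)+1): cnt += 1' — the counting loop A repeats in every branch
def pvSpanLoopA (a b cnt : Int) : Int :=
  (PySem.List.pyRange a (b + 1) 1).foldl (fun c _ => c + 1) cnt

-- the identical len==2 / len==3 block that appears in A's SP/P/D/F branches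
-- (int(...) is PySem.Int.ofStr?; its failures are excluded by Pre_, so .getD 0 is unreachable there)
def pvRangeCountA (line : List String) (cnt : Int) : Int :=
  if line.length = 2 then
    let shells := (PySem.Str.split? (PySem.List.pyGetD line 0 "") "-").getD []
    pvSpanLoopA ((PySem.Int.ofStr? (PySem.List.pyGetD shells 0 "")).getD 0)
                ((PySem.Int.ofStr? (PySem.List.pyGetD shells 1 "")).getD 0) cnt
  else if line.length = 3 then
    pvSpanLoopA ((PySem.Int.ofStr? (PySem.List.pyGetD
                    ((PySem.Str.split? (PySem.List.pyGetD line 0 "") "-").getD []) 0 "")).getD 0)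
                ((PySem.Int.ofStr? (PySem.List.pyGetD line 1 "")).getD 0) cnt
  else cnt

-- A's elif chain on one line of the inner scan, state (S, SP, P, D, F)
def pvBumpA (line : List String) (st : Int × Int × Int × Int × Int) :
    Int × Int × Int × Int × Int :=
  if 0 < line.length then
    let lastel := PySem.List.pyGetD line (-1) ""
    if PySem.Str.isIn "S" lastel then (st.1 + 1, st.2.1, st.2.2.1, st.2.2.2.1, st.2.2.2.2)
    else if PySem.Str.isIn "SP" lastel then
      (st.1, pvRangeCountA line st.2.1, st.2.2.1, st.2.2.2.1, st.2.2.2.2)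
    else if PySem.Str.isIn "P" lastel then
      (st.1, st.2.1, pvRangeCountA line st.2.2.1, st.2.2.2.1, st.2.2.2.2)
    else if PySem.Str.isIn "D" lastel then
      (st.1, st.2.1, st.2.2.1, pvRangeCountA line st.2.2.2.1, st.2.2.2.2)
    else if PySem.Str.isIn "F" lastel then
      (st.1, st.2.1, st.2.2.1, st.2.2.2.1, pvRangeCountA line st.2.2.2.2)
    else st
  else st

-- body of A's inner 'for i in range(atom[1]+1, len(data_list))' loop: the flag is the 'break'
def pvScanF (acc : Bool × (Int × Int × Int × Int × Int)) (line : List String) :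
    Bool × (Int × Int × Int × Int × Int) :=
  if acc.1 then acc
  else if 5 ≤ line.length then (true, acc.2)
  else (false, pvBumpA line acc.2)

-- A's inner scan for one atom first seen at index idx
def pvInnerScanA (data_list : List (List String)) (idx : Int) : Int × Int × Int × Int × Int :=
  ((PySem.List.pyRange (idx + 1) (PySem.List.len data_list) 1).foldl
      (fun acc i => pvScanF acc (PySem.List.pyGetD data_list i [])) (false, (0, 0, 0, 0, 0))).2

-- body of A's first 'for i, line in enumerate(data_list)' loop: (atoms, atom_list, atoms_index)
def pvPass1F (acc : List String × List String × List (String × Int)) (p : Int × List String) :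
    List String × List String × List (String × Int) :=
  if p.2.length = 5 then
    let sym := PySem.List.pyGetD p.2 1 ""
    if acc.2.1.contains sym then (acc.1 ++ [sym], acc.2.1, acc.2.2)
    else (acc.1 ++ [sym], acc.2.1 ++ [sym], acc.2.2 ++ [(sym, p.1)])
  else acc

def get_atoms_and_shells (data_list : List (List String)) :
    List String × (List (String × List (String × Int))) :=
  let p := (PySem.List.enumerate data_list 0).foldl pvPass1F ([], [], [])
  let atoms_shells :=
    p.2.2.foldl
      (fun (d : PySem.Dict String (List (String × Int))) atom =>
        let c := pvInnerScanA data_list atom.2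
        d.insert atom.1
          [("S", c.1), ("SP", c.2.1), ("P", c.2.2.1), ("D", c.2.2.2.1), ("F", c.2.2.2.2)])
      PySem.Dict.empty
  (p.1, atoms_shells.items)

-- ===== PORT B =====
-- number of shells a P/D/F line contributes (Source B's _span, an arithmetic formula)
def pvSpanB (line : List String) : Int :=
  if line.length = 2 then
    let parts := (PySem.Str.split? (PySem.List.pyGetD line 0 "") "-").getD []
    max 0 ((PySem.Int.ofStr? (PySem.List.pyGetD parts 1 "")).getD 0 + 1
           - (PySem.Int.ofStr? (PySem.List.pyGetD parts 0 "")).getD 0)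
  else if line.length = 3 then
    max 0 ((PySem.Int.ofStr? (PySem.List.pyGetD line 1 "")).getD 0 + 1
           - (PySem.Int.ofStr? (PySem.List.pyGetD
                ((PySem.Str.split? (PySem.List.pyGetD line 0 "") "-").getD []) 0 "")).getD 0)
  else 0

-- Source B's chain updating the counts [S, SP, P, D, F] of the active atom
def pvBumpB (line : List String) (c : Int × Int × Int × Int × Int) :
    Int × Int × Int × Int × Int :=
  let lastel := PySem.List.pyGetD line (-1) ""
  if PySem.Str.isIn "S" lastel then (c.1 + 1, c.2.1, c.2.2.1, c.2.2.2.1, c.2.2.2.2)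
  else if PySem.Str.isIn "P" lastel then (c.1, c.2.1, c.2.2.1 + pvSpanB line, c.2.2.2.1, c.2.2.2.2)
  else if PySem.Str.isIn "D" lastel then (c.1, c.2.1, c.2.2.1, c.2.2.2.1 + pvSpanB line, c.2.2.2.2)
  else if PySem.Str.isIn "F" lastel then (c.1, c.2.1, c.2.2.1, c.2.2.2.1, c.2.2.2.2 + pvSpanB line)
  else c

-- body of Source B's single loop; state (atoms, table, active)
def pvStepB
    (st : List String × PySem.Dict String (Int × Int × Int × Int × Int) × Option String)
    (line : List String) :
    List String × PySem.Dict String (Int × Int × Int × Int × Int) × Option String :=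
  if line.length = 5 then
    let sym := PySem.List.pyGetD line 1 ""
    if st.2.1.contains sym then (st.1 ++ [sym], st.2.1, none)
    else (st.1 ++ [sym], st.2.1.insert sym (0, 0, 0, 0, 0), some sym)
  else if 5 < line.length then (st.1, st.2.1, none)
  else
    match st.2.2 with
    | some a => if 0 < line.length then (st.1, st.2.1.modify a (0, 0, 0, 0, 0) (pvBumpB line), some a) else st
    | none => st

def get_atoms_and_shells_alt (data_list : List (List String)) :
    List String × (List (String × List (String × Int))) :=
  let st := data_list.foldl pvStepB ([], PySem.Dict.empty, none)
  (st.1,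
   st.2.1.items.map (fun p =>
     (p.1, [("S", p.2.1), ("SP", p.2.2.1), ("P", p.2.2.2.1), ("D", p.2.2.2.2.1),
            ("F", p.2.2.2.2.2)])))

-- ===== PRECONDITION & SPEC =====
-- int(s) succeeds
def pvParseable (s : String) : Bool := (PySem.Int.ofStr? s).isSome

-- the elif chain cannot raise on this line (only P/D/F lines of length 2/3 parse ints;
-- a length-2 line also needs its '-'-split to have a second part)
def pvLineSafe (line : List String) : Bool :=
  if line.length == 0 || decide (5 ≤ line.length) then true
  else
    let lastel := line.getLast?.getD ""
    if PySem.Str.isIn "S" lastel then true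
    else if PySem.Str.isIn "P" lastel || PySem.Str.isIn "D" lastel || PySem.Str.isIn "F" lastel then
      if line.length == 2 then
        let parts := (PySem.Str.split? (line.getD 0 "") "-").getD []
        decide (2 ≤ parts.length) && pvParseable (parts.getD 0 "") && pvParseable (parts.getD 1 "")
      else if line.length == 3 then
        pvParseable (((PySem.Str.split? (line.getD 0 "") "-").getD []).getD 0 "")
          && pvParseable (line.getD 1 "")
      else true
    else true

-- line i is examined by A's inner scan: some j < i starts a block (length-5 line whose
-- symbol occurs for the first time among length-5 lines) and no line strictly between
-- j and i has length ≥ 5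
def pvScannedLine (dl : List (List String)) (i : Nat) : Bool :=
  (List.range i).any (fun j =>
    (dl.getD j []).length == 5
    && ((List.range i).all (fun k => !(decide (j < k)) || decide ((dl.getD k []).length < 5)))
    && ((List.range j).all (fun k =>
          (dl.getD k []).length != 5
          || !((dl.getD k []).getD 1 "" == (dl.getD j []).getD 1 ""))))

-- Pre_ excludes exactly the inputs where A raises (ValueError from int(), or IndexError on a
-- length-2 shell line without '-'), i.e. where some scanned line is unsafe.
def Pre_get_atoms_and_shells (data_list : List (List String)) : Prop :=
  ∀ i < data_list.length, pvScannedLine data_list i = true → pvLineSafe (data_list.getD i []) = true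
instance (data_list : List (List String)) : Decidable (Pre_get_atoms_and_shells data_list) := by
  unfold Pre_get_atoms_and_shells; infer_instance

def pvWitness_get_atoms_and_shells : List (List String) :=
  [["1", "Fe", "a", "b", "c"], ["1-3", "S"], ["2-4", "P"], ["1", "2", "3D"]]

def Spec_get_atoms_and_shells (data_list : List (List String)) (out : List String × (List (String × List (String × Int)))) : Prop := out = get_atoms_and_shells_alt data_list
instance (data_list : List (List String)) (out : List String × (List (String × List (String × Int)))) : Decidable (Spec_get_atoms_and_shells data_list out) := by unfold Spec_get_atoms_and_shells; infer_instance

-- ===== CLAIM (what is proved, stated in full; the proofs are below) =====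
def Claim_equal_get_atoms_and_shells : Prop := ∀ (data_list : List (List String)), Dom_get_atoms_and_shells data_list → Pre_get_atoms_and_shells data_list → Spec_get_atoms_and_shells data_list (get_atoms_and_shells data_list)

-- ===== LEMMAS AND PROOFS =====

-- spec-side vocabulary (used only by the proofs)

def pvAtomsOf (dl : List (List String)) : List String :=
  (dl.filter (fun l => l.length == 5)).map (fun l => PySem.List.pyGetD l 1 "")

def pvTW (l : List (List String)) : List (List String) :=
  l.takeWhile (fun line => decide (line.length < 5))

def pvFoldBump (c : Int × Int × Int × Int × Int) (l : List (List String)) :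
    Int × Int × Int × Int × Int :=
  l.foldl (fun c line => pvBumpB line c) c

def pvAShells : List (List String) → List String → List (String × (Int × Int × Int × Int × Int))
  | [], _ => []
  | l :: rest, seen =>
    if l.length = 5 then
      let sym := PySem.List.pyGetD l 1 ""
      if seen.contains sym then pvAShells rest seen
      else (sym, pvFoldBump (0, 0, 0, 0, 0) (pvTW rest)) :: pvAShells rest (seen ++ [sym])
    else pvAShells rest seen

def pvSeenUpd : List (List String) → List String → List String
  | [], seen => seen
  | l :: rest, seen =>
    if l.length = 5 then
      let sym := PySem.List.pyGetD l 1 ""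
      if seen.contains sym then pvSeenUpd rest seen else pvSeenUpd rest (seen ++ [sym])
    else pvSeenUpd rest seen

def pvFirstOccs : List (List String) → List String → Int → List (String × Int)
  | [], _, _ => []
  | l :: rest, seen, i =>
    if l.length = 5 then
      let sym := PySem.List.pyGetD l 1 ""
      if seen.contains sym then pvFirstOccs rest seen (i + 1)
      else (sym, i) :: pvFirstOccs rest (seen ++ [sym]) (i + 1)
    else pvFirstOccs rest seen (i + 1)

def pvApply (table : PySem.Dict String (Int × Int × Int × Int × Int)) (active : Option String)
    (suffix : List (List String)) : PySem.Dict String (Int × Int × Int × Int × Int) :=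
  match active with
  | none => table
  | some a => table.modify a (0, 0, 0, 0, 0) (fun c => pvFoldBump c (pvTW suffix))

theorem pvSpanLoopA_eq (a b c : Int) : pvSpanLoopA a b c = c + max 0 (b + 1 - a) := by
  unfold pvSpanLoopA
  rw [PySem.List.foldl_add (g := fun _ => 1), PySem.List.sum_map_const_int,
    PySem.List.length_pyRange_one]
  omega

theorem pvRangeCountA_eq (line : List String) (cnt : Int) :
    pvRangeCountA line cnt = cnt + pvSpanB line := by
  unfold pvRangeCountA pvSpanB
  split_ifs <;> simp [pvSpanLoopA_eq]

theorem pvIsIn_S_of_SP (s : String) (h : PySem.Str.isIn "SP" s = true) :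
    PySem.Str.isIn "S" s = true := by
  rw [PySem.Str.isIn_iff_infix] at *
  exact List.IsInfix.trans (by decide) h

theorem pvBump_eq (line : List String) (st : Int × Int × Int × Int × Int) :
    pvBumpA line st = if 0 < line.length then pvBumpB line st else st := by
  unfold pvBumpA pvBumpB
  by_cases hl : 0 < line.length
  · simp only [hl, if_true]
    by_cases hS : PySem.Str.isIn "S" (PySem.List.pyGetD line (-1) "") = true
    · simp only [hS, if_true]
    · have hSP : PySem.Str.isIn "SP" (PySem.List.pyGetD line (-1) "") = false := by
        by_contra h
        exact hS (pvIsIn_S_of_SP _ (by simpa using h))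
      simp only [Bool.not_eq_true] at hS
      simp only [hS, hSP, Bool.false_eq_true, if_false, pvRangeCountA_eq]
  · simp [hl]

theorem pvScanF_true (l : List (List String)) (c : Int × Int × Int × Int × Int) :
    l.foldl pvScanF (true, c) = (true, c) := by
  induction l with
  | nil => rfl
  | cons h t ih => simpa [pvScanF] using ih

theorem pvScanF_snd (l : List (List String)) (c : Int × Int × Int × Int × Int) :
    (l.foldl pvScanF (false, c)).2 = pvFoldBump c (pvTW l) := by
  induction l generalizing c with
  | nil => rfl
  | cons h t ih =>
    by_cases h5 : 5 ≤ h.length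
    · have hnot : ¬ h.length < 5 := by omega
      simp [pvScanF, pvTW, h5, hnot, pvScanF_true, pvFoldBump]
    · have hlt : h.length < 5 := by omega
      simp only [List.foldl_cons, pvScanF, h5, if_false, Bool.false_eq_true]
      rw [ih (pvBumpA h c)]
      simp [pvTW, pvFoldBump, hlt, pvBump_eq]
      rcases Nat.eq_zero_or_pos h.length with h0 | hpos
      · have he : h = [] := List.length_eq_zero_iff.mp h0
        subst he
        norm_num
        rfl
      · simp [hpos]

theorem pvPass1_eq (dl : List (List String)) :
    ∀ (s : Int) (atoms seen : List String) (occs : List (String × Int)),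
    (PySem.List.enumerate dl s).foldl pvPass1F (atoms, seen, occs)
      = (atoms ++ pvAtomsOf dl, pvSeenUpd dl seen, occs ++ pvFirstOccs dl seen s) := by
  induction dl with
  | nil => intro s atoms seen occs; simp [pvAtomsOf, pvSeenUpd, pvFirstOccs, PySem.List.enumerate]
  | cons l rest ih =>
    intro s atoms seen occs
    rw [PySem.List.enumerate_cons, List.foldl_cons]
    by_cases h5 : l.length = 5
    · by_cases hc : seen.contains (PySem.List.pyGetD l 1 "") = true
      · simp only [pvPass1F, h5, if_true, hc]
        rw [ih]
        have hm : PySem.List.pyGetD l 1 "" ∈ seen := by simpa using hc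
        simp [pvAtomsOf, pvSeenUpd, pvFirstOccs, h5, hm]
      · simp only [Bool.not_eq_true] at hc
        simp only [pvPass1F, h5, if_true, hc, Bool.false_eq_true, if_false]
        rw [ih]
        have hm : PySem.List.pyGetD l 1 "" ∉ seen := by
          simpa using hc
        simp [pvAtomsOf, pvSeenUpd, pvFirstOccs, h5, hm]
    · simp only [pvPass1F, h5, if_false]
      rw [ih]
      simp [pvAtomsOf, pvSeenUpd, pvFirstOccs, h5]

theorem pvFirstOccs_keys_fresh (dl : List (List String)) :
    ∀ (seen : List String) (i : Int),
    ((pvFirstOccs dl seen i).map Prod.fst).Nodup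
      ∧ ∀ x ∈ (pvFirstOccs dl seen i).map Prod.fst, seen.contains x = false := by
  induction dl with
  | nil => intro seen i; simp [pvFirstOccs]
  | cons l rest ih =>
    intro seen i
    by_cases h5 : l.length = 5
    · by_cases hc : seen.contains (PySem.List.pyGetD l 1 "") = true
      · have hm : PySem.List.pyGetD l 1 "" ∈ seen := by simpa using hc
        simpa [pvFirstOccs, h5, hm] using ih seen (i + 1)
      · simp only [Bool.not_eq_true] at hc
        have hm : PySem.List.pyGetD l 1 "" ∉ seen := by simpa using hc
        obtain ⟨ihn, ihf⟩ := ih (seen ++ [PySem.List.pyGetD l 1 ""]) (i + 1)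
        simp only [pvFirstOccs, h5, if_true, hc, Bool.false_eq_true, if_false, List.map_cons]
        constructor
        · refine List.Nodup.cons (fun hmem => ?_) ihn
          have := ihf _ hmem
          simp at this
        · intro x hx
          rcases List.mem_cons.mp hx with rfl | hx
          · exact hc
          · have := ihf x hx
            simp at this
            simpa using this.1
    · simpa [pvFirstOccs, h5] using ih seen (i + 1)

theorem pvInnerScanA_at (pre : List (List String)) (l : List String)
    (rest : List (List String)) :
    pvInnerScanA (pre ++ l :: rest) (pre.length : Int) = pvFoldBump (0, 0, 0, 0, 0) (pvTW rest) := by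
  unfold pvInnerScanA
  have h0 : (0 : Int) ≤ (pre.length : Int) + 1 := by positivity
  rw [PySem.List.foldl_pyRange_pyGetD _ _ pvScanF _ h0]
  have ht : ((pre.length : Int) + 1).toNat = (pre ++ [l]).length := by simp
  rw [ht, show pre ++ l :: rest = (pre ++ [l]) ++ rest by simp, List.drop_left]
  exact pvScanF_snd rest _

theorem pvFirstOccs_map_inner (dl : List (List String)) :
    ∀ (suffix pre : List (List String)) (seen : List String), dl = pre ++ suffix →
    (pvFirstOccs suffix seen (pre.length : Int)).map
        (fun p => (p.1, pvInnerScanA dl p.2))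
      = pvAShells suffix seen := by
  intro suffix
  induction suffix with
  | nil => intro pre seen hdl; simp [pvFirstOccs, pvAShells]
  | cons l rest ih =>
    intro pre seen hdl
    have hrec : ∀ se : List String,
        (pvFirstOccs rest se ((pre ++ [l]).length : Int)).map
            (fun p => (p.1, pvInnerScanA dl p.2)) = pvAShells rest se :=
      fun se => ih (pre ++ [l]) se (by simp [hdl])
    have hlen : ((pre ++ [l]).length : Int) = (pre.length : Int) + 1 := by simp
    by_cases h5 : l.length = 5
    · by_cases hc : seen.contains (PySem.List.pyGetD l 1 "") = true
      · have hm : PySem.List.pyGetD l 1 "" ∈ seen := by simpa using hc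
        simp only [pvFirstOccs, pvAShells, h5, if_true, hc]
        rw [← hlen, hrec seen]
      · simp only [Bool.not_eq_true] at hc
        have hm : PySem.List.pyGetD l 1 "" ∉ seen := by simpa using hc
        simp only [pvFirstOccs, pvAShells, h5, if_true, hc, Bool.false_eq_true, if_false,
          List.map_cons]
        rw [← hlen, hrec]
        subst hdl
        rw [pvInnerScanA_at]
    · simp only [pvFirstOccs, pvAShells, h5, if_false]
      rw [← hlen, hrec seen]

theorem pvDict_modify_id {ν : Type} (d : PySem.Dict String ν) (a : String) (d0 : ν)
    (h : d.contains a = true) (hnd : d.keys.Nodup) : d.modify a d0 (fun c => c) = d := by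
  have hk : (d.modify a d0 (fun c => c)).keys = d.keys := by
    rw [PySem.Dict.keys_modify, PySem.Dict.keys_insert_of_contains _ _ h]
  apply PySem.Dict.ext
  rw [PySem.Dict.items_eq_map_keys _ (hk ▸ hnd) d0, PySem.Dict.items_eq_map_keys d hnd d0, hk]
  refine List.map_congr_left fun k hkk => ?_
  rw [PySem.Dict.getD_modify]
  split_ifs with he
  · subst he; rfl
  · rfl

theorem pvDict_insert_modify {ν : Type} (d : PySem.Dict String ν) (k : String) (v : ν) (d0 : ν)
    (f : ν → ν) (h : d.contains k = false) (hnd : d.keys.Nodup) :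
    ((d.insert k v).modify k d0 f).items = d.items ++ [(k, f v)] := by
  have hkm : k ∉ d.keys := by
    intro hm; rw [(PySem.Dict.contains_iff_mem_keys d k).mpr hm] at h; cases h
  have hki : (d.insert k v).keys = d.keys ++ [k] := PySem.Dict.keys_insert_of_not_contains d v h
  have hci : (d.insert k v).contains k = true := PySem.Dict.contains_insert_self d k v
  have hkmod : ((d.insert k v).modify k d0 f).keys = d.keys ++ [k] := by
    rw [PySem.Dict.keys_modify, PySem.Dict.keys_insert_of_contains _ _ hci, hki]
  have hnd2 : (d.keys ++ [k]).Nodup := by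
    refine List.Nodup.append hnd (List.nodup_singleton k) ?_
    intro a ha hb
    simp only [List.mem_singleton] at hb
    exact hkm (hb ▸ ha)
  rw [PySem.Dict.items_eq_map_keys _ (hkmod ▸ hnd2) d0, hkmod, List.map_append,
    PySem.Dict.items_eq_map_keys d hnd d0]
  congr 1
  · refine List.map_congr_left fun x hx => ?_
    have hne : x ≠ k := fun he => hkm (he ▸ hx)
    rw [PySem.Dict.getD_modify]
    rw [if_neg hne, PySem.Dict.getD_insert_of_ne (hne := hne)]
  · simp only [List.map_cons, List.map_nil]
    rw [PySem.Dict.getD_modify_self, PySem.Dict.getD_insert_self]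

theorem pvDict_modify_modify {ν : Type} (d : PySem.Dict String ν) (a : String) (d0 : ν)
    (f g : ν → ν) (h : d.contains a = true) (hnd : d.keys.Nodup) :
    (d.modify a d0 f).modify a d0 g = d.modify a d0 (fun c => g (f c)) := by
  have hk1 : (d.modify a d0 f).keys = d.keys := by
    rw [PySem.Dict.keys_modify, PySem.Dict.keys_insert_of_contains _ _ h]
  have hc1 : (d.modify a d0 f).contains a = true := by
    rw [PySem.Dict.contains_modify]; simp
  have hk2 : ((d.modify a d0 f).modify a d0 g).keys = d.keys := by
    rw [PySem.Dict.keys_modify, PySem.Dict.keys_insert_of_contains _ _ hc1, hk1]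
  have hk3 : (d.modify a d0 (fun c => g (f c))).keys = d.keys := by
    rw [PySem.Dict.keys_modify, PySem.Dict.keys_insert_of_contains _ _ h]
  apply PySem.Dict.ext
  rw [PySem.Dict.items_eq_map_keys _ (hk2 ▸ hnd) d0, PySem.Dict.items_eq_map_keys _ (hk3 ▸ hnd) d0,
    hk2, hk3]
  refine List.map_congr_left fun k hkk => ?_
  simp only [PySem.Dict.getD_modify]
  split_ifs <;> rfl

theorem pvApply_none (t : PySem.Dict String (Int × Int × Int × Int × Int))
    (suf : List (List String)) : pvApply t none suf = t := rfl

theorem pvApply_some (t : PySem.Dict String (Int × Int × Int × Int × Int)) (x : String)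
    (suf : List (List String)) :
    pvApply t (some x) suf = t.modify x (0, 0, 0, 0, 0) (fun c => pvFoldBump c (pvTW suf)) := rfl

theorem pvB_main (suffix : List (List String)) :
    ∀ (atoms : List String) (table : PySem.Dict String (Int × Int × Int × Int × Int))
      (active : Option String), table.keys.Nodup →
      (∀ x, active = some x → table.contains x = true) →
      (suffix.foldl pvStepB (atoms, table, active)).1 = atoms ++ pvAtomsOf suffix
      ∧ (suffix.foldl pvStepB (atoms, table, active)).2.1.items
          = (pvApply table active suffix).items ++ pvAShells suffix table.keys := by
  induction suffix with
  | nil =>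
    intro atoms table active hnd hact
    refine ⟨by simp [pvAtomsOf], ?_⟩
    rcases active with _ | a
    · simp [pvApply_none, pvAShells]
    · rw [List.foldl_nil, pvApply_some,
        show (fun c => pvFoldBump c (pvTW ([] : List (List String)))) = fun c : Int × Int × Int × Int × Int => c from funext fun c => rfl,
        pvDict_modify_id table a _ (hact a rfl) hnd]
      simp [pvAShells]
  | cons l rest ih =>
    intro atoms table active hnd hact
    rw [List.foldl_cons]
    by_cases h5 : l.length = 5
    · have hTW : pvTW (l :: rest) = [] := by
        simp [pvTW, h5]
      have happ : (pvApply table active (l :: rest)).items = table.items := by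
        rcases active with _ | a
        · rfl
        · rw [pvApply_some,
            show (fun c => pvFoldBump c (pvTW (l :: rest))) = fun c : Int × Int × Int × Int × Int => c by rw [hTW]; exact funext fun c => rfl,
            pvDict_modify_id table a _ (hact a rfl) hnd]
      by_cases hc : table.contains (PySem.List.pyGetD l 1 "") = true
      · have hck : table.keys.contains (PySem.List.pyGetD l 1 "") = true := by
          simpa using (PySem.Dict.contains_iff_mem_keys table _).mp hc
        have hst : pvStepB (atoms, table, active) l
            = (atoms ++ [PySem.List.pyGetD l 1 ""], table, none) := by
          simp [pvStepB, h5, hc]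
        rw [hst]
        obtain ⟨ih1, ih2⟩ := ih (atoms ++ [PySem.List.pyGetD l 1 ""]) table none hnd
          (by intro x hx; cases hx)
        refine ⟨?_, ?_⟩
        · rw [ih1]; simp [pvAtomsOf, h5]
        · rw [ih2, pvApply_none, happ]
          simp only [pvAShells, h5, if_true, hck]
      · have hfresh : table.contains (PySem.List.pyGetD l 1 "") = false := by
          simpa using hc
        have hck : table.keys.contains (PySem.List.pyGetD l 1 "") = false := by
          by_cases hm : PySem.List.pyGetD l 1 "" ∈ table.keys
          · exact absurd ((PySem.Dict.contains_iff_mem_keys table _).mpr hm) (by simp [hfresh])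
          · simpa using hm
        have hst : pvStepB (atoms, table, active) l
            = (atoms ++ [PySem.List.pyGetD l 1 ""],
               table.insert (PySem.List.pyGetD l 1 "") (0, 0, 0, 0, 0),
               some (PySem.List.pyGetD l 1 "")) := by
          simp [pvStepB, h5, hfresh]
        rw [hst]
        obtain ⟨ih1, ih2⟩ := ih (atoms ++ [PySem.List.pyGetD l 1 ""])
          (table.insert (PySem.List.pyGetD l 1 "") (0, 0, 0, 0, 0))
          (some (PySem.List.pyGetD l 1 ""))
          (PySem.Dict.nodup_keys_insert table _ _ hnd)
          (by intro x hx; cases hx; exact PySem.Dict.contains_insert_self table _ _)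
        refine ⟨?_, ?_⟩
        · rw [ih1]; simp [pvAtomsOf, h5]
        · rw [ih2, pvApply_some,
            pvDict_insert_modify table _ _ _ _ hfresh hnd,
            PySem.Dict.keys_insert_of_not_contains table _ hfresh, happ]
          simp only [pvAShells, h5, if_true, hck, Bool.false_eq_true, if_false]
          simp [pvFoldBump]
    · by_cases hgt : 5 < l.length
      · have hTW : pvTW (l :: rest) = [] := by
          simp only [pvTW, List.takeWhile_cons]
          rw [if_neg (by simp; omega)]
        have happ : (pvApply table active (l :: rest)).items = table.items := by
          rcases active with _ | a
          · rfl
          · rw [pvApply_some,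
              show (fun c => pvFoldBump c (pvTW (l :: rest))) = fun c : Int × Int × Int × Int × Int => c by rw [hTW]; exact funext fun c => rfl,
              pvDict_modify_id table a _ (hact a rfl) hnd]
        have hst : pvStepB (atoms, table, active) l = (atoms, table, none) := by
          simp [pvStepB, h5, hgt]
        rw [hst]
        obtain ⟨ih1, ih2⟩ := ih atoms table none hnd (by intro x hx; cases hx)
        refine ⟨?_, ?_⟩
        · rw [ih1]; simp [pvAtomsOf, h5]
        · rw [ih2, pvApply_none, happ]
          simp only [pvAShells, h5, if_false]
      · have hlt : l.length < 5 := by omega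
        have hTW : pvTW (l :: rest) = l :: pvTW rest := by
          simp [pvTW, hlt]
        rcases active with _ | a
        · have hst : pvStepB (atoms, table, none) l = (atoms, table, none) := by
            simp [pvStepB, h5, hgt]
          rw [hst]
          obtain ⟨ih1, ih2⟩ := ih atoms table none hnd (by intro x hx; cases hx)
          refine ⟨?_, ?_⟩
          · rw [ih1]; simp [pvAtomsOf, h5]
          · rw [ih2, pvApply_none, pvApply_none]
            simp only [pvAShells, h5, if_false]
        · have hca : table.contains a = true := hact a rfl
          have hka : (table.modify a (0, 0, 0, 0, 0) (pvBumpB l)).keys = table.keys := by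
            rw [PySem.Dict.keys_modify, PySem.Dict.keys_insert_of_contains _ _ hca]
          by_cases hpos : 0 < l.length
          · have hst : pvStepB (atoms, table, some a) l
                = (atoms, table.modify a (0, 0, 0, 0, 0) (pvBumpB l), some a) := by
              simp [pvStepB, h5, hgt, hpos]
            rw [hst]
            obtain ⟨ih1, ih2⟩ := ih atoms (table.modify a (0, 0, 0, 0, 0) (pvBumpB l)) (some a)
              (hka ▸ hnd)
              (by intro x hx; cases hx; rw [PySem.Dict.contains_modify]; simp)
            refine ⟨?_, ?_⟩
            · rw [ih1]; simp [pvAtomsOf, h5]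
            · rw [ih2, pvApply_some, pvApply_some, hka,
                pvDict_modify_modify table a _ _ _ hca hnd,
                show (fun c => pvFoldBump (pvBumpB l c) (pvTW rest))
                    = fun c => pvFoldBump c (pvTW (l :: rest)) by
                  funext c; rw [hTW]; rfl]
              simp only [pvAShells, h5, if_false]
          · have hnil : l = [] := List.length_eq_zero_iff.mp (by omega)
            have hst : pvStepB (atoms, table, some a) l = (atoms, table, some a) := by
              simp [pvStepB, h5, hgt, hpos]
            rw [hst]
            obtain ⟨ih1, ih2⟩ := ih atoms table (some a) hnd hact
            refine ⟨?_, ?_⟩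
            · rw [ih1]; simp [pvAtomsOf, h5]
            · rw [ih2, pvApply_some, pvApply_some,
                show (fun c => pvFoldBump c (pvTW rest))
                    = fun c => pvFoldBump c (pvTW (l :: rest)) by
                  funext c; rw [hTW, hnil]; rfl]
              simp only [pvAShells, h5, if_false]

theorem pvDict_empty_items {κ ν : Type} : (PySem.Dict.empty : PySem.Dict κ ν).items = [] := by
  have h := PySem.Dict.keys_empty (κ := κ) (ν := ν)
  simp only [PySem.Dict.keys] at h
  exact List.map_eq_nil_iff.mp h

theorem pv_main (dl : List (List String)) :
    get_atoms_and_shells dl = get_atoms_and_shells_alt dl := by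
  unfold get_atoms_and_shells get_atoms_and_shells_alt
  obtain ⟨hb1, hb2⟩ := pvB_main dl [] PySem.Dict.empty none
    (by rw [PySem.Dict.keys_empty]; exact List.nodup_nil)
    (by intro x hx; cases hx)
  rw [pvPass1_eq]
  simp only [List.nil_append]
  rw [PySem.Dict.items_foldl_insert_fresh (pvFirstOccs dl [] 0) Prod.fst
      (fun atom => [("S", (pvInnerScanA dl atom.2).1), ("SP", (pvInnerScanA dl atom.2).2.1),
        ("P", (pvInnerScanA dl atom.2).2.2.1), ("D", (pvInnerScanA dl atom.2).2.2.2.1),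
        ("F", (pvInnerScanA dl atom.2).2.2.2.2)])
      PySem.Dict.empty
      (fun a _ => PySem.Dict.contains_empty a.1)
      (pvFirstOccs_keys_fresh dl [] 0).1]
  rw [hb1, hb2, pvApply_none, pvDict_empty_items, PySem.Dict.keys_empty]
  have hmap : (pvFirstOccs dl [] 0).map
        (fun atom => (atom.1, [("S", (pvInnerScanA dl atom.2).1),
          ("SP", (pvInnerScanA dl atom.2).2.1), ("P", (pvInnerScanA dl atom.2).2.2.1),
          ("D", (pvInnerScanA dl atom.2).2.2.2.1), ("F", (pvInnerScanA dl atom.2).2.2.2.2)]))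
      = ((pvFirstOccs dl [] 0).map (fun p => (p.1, pvInnerScanA dl p.2))).map
          (fun q => (q.1, [("S", q.2.1), ("SP", q.2.2.1), ("P", q.2.2.2.1), ("D", q.2.2.2.2.1),
            ("F", q.2.2.2.2.2)])) := by
    rw [List.map_map]
    rfl
  have hocc := pvFirstOccs_map_inner dl dl [] [] rfl
  simp only [List.length_nil, Nat.cast_zero] at hocc
  rw [hmap, hocc]
  simp [pvDict_empty_items]

-- ===== VERDICT (by name: the statement is the Claim_ definition above) =====
theorem get_atoms_and_shells_spec : Claim_equal_get_atoms_and_shells := by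
  intro dl _ _
  unfold Spec_get_atoms_and_shells
  exact pv_main dl
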